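-- pv_equiv track=rewrite | github.com/Alpha3Cloud/FGBackup | FGBackup.py | _clean_config_output
-- ===== SOURCE A (Python) =====
-- def _clean_config_output(output: str) -> str:
--     """Clean configuration output by removing command echoes, prompts, and pagination artifacts."""
--     lines = output.split('\n')
--     cleaned_lines = []
--
--     skip_until_config = True
--     for line in lines:
--         line_stripped = line.strip()
--
--         # Skip until we find the actual configuration
--         if skip_until_config:
--             if line_stripped.startswith('#config-version=') or line_stripped.startswith('config '):
--                 skip_until_config = False
--                 cleaned_lines.append(line)
--             continue
--
--         # Skip command prompts, echoes, and pagination artifacts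
--         if (line_stripped.endswith('#') or
--             line_stripped.endswith('$') or
--             line_stripped.startswith('show') or
--             line_stripped == '--More--' or
--             'Handling pagination...' in line_stripped or
--             'Downloaded:' in line_stripped):
--             continue
--
--         # Skip empty lines at the beginning but keep them in config
--         if line_stripped or cleaned_lines:
--             cleaned_lines.append(line)
--
--     # Remove trailing empty lines
--     while cleaned_lines and not cleaned_lines[-1].strip():
--         cleaned_lines.pop()
--
--     return '\n'.join(cleaned_lines)
-- ===== SOURCE B (Python) =====
-- def _is_start(s: str) -> bool:
--     return s.startswith('#config-version=') or s.startswith('config ')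
--
--
-- def _is_noise(s: str) -> bool:
--     return (s.endswith('#') or s.endswith('$') or s.startswith('show')
--             or s == '--More--' or 'Handling pagination...' in s
--             or 'Downloaded:' in s)
--
--
-- def _clean_config_output(output: str) -> str:
--     """Clean configuration output by removing command echoes, prompts, and pagination artifacts."""
--     acc = []            # surviving lines, in reverse order; starts only once a non-blank survivor is seen
--     start = None        # earliest config-start line seen so far
--     k = 0               # how many lines of acc lie after that start line
--     for line in reversed(output.split('\n')):
--         s = line.strip()
--         if _is_start(s):
--             start, k = line, len(acc)
--         if _is_noise(s):
--             continue
--         if not s and not acc: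
--             continue     # trailing blank: nothing kept after it yet
--         acc.append(line)
--     if start is None:
--         return ''
--     return '\n'.join([start] + acc[:k][::-1])
-- ===== Notes on version B (the rewrite author's own statement) =====
-- stated objective: alternative
-- what changed: B replaces A's forward loop with a skip_until_config flag plus a separate trailing while-pop by a single reverse pass: scanning the lines back-to-front lets the trailing-blank trim become a simple 'skip blanks while nothing kept yet' condition folded into the same loop, and the first config-start line is located by keeping a snapshot index k of the accumulator each time a start line is met, so no pop loop and no skip flag remain.
import Mathlib
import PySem

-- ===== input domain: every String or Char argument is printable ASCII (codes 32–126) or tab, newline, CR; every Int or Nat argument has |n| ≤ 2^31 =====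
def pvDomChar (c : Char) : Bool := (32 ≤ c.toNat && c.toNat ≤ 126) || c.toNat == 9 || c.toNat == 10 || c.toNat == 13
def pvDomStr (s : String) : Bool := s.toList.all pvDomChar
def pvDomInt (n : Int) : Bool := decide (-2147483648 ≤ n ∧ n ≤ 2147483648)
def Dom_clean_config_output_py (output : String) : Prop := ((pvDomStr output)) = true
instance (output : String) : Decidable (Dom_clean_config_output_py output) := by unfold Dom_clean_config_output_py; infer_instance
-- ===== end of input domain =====

-- B replaces A's forward skip-flag loop plus trailing while-pop by ONE reverse pass that folds
-- the trailing-blank trim, the noise filter and the config-start location (a snapshot index)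
-- into a single accumulator (objective: alternative, same O(n) cost).

-- ===== PORT A =====
-- one iteration of A's for-loop; state = (skip_until_config, cleaned_lines)
def pvStepA (st : Bool × List String) (line : String) : Bool × List String :=
  let s := PySem.Str.strip line
  if st.1 then
    if PySem.Str.startswith s "#config-version=" || PySem.Str.startswith s "config " then
      (false, st.2 ++ [line])
    else st
  else if PySem.Str.endswith s "#" || PySem.Str.endswith s "$" ||
          PySem.Str.startswith s "show" || s == "--More--" ||
          PySem.Str.isIn "Handling pagination..." s || PySem.Str.isIn "Downloaded:" s then
    st
  else if s != "" || st.2 != [] then (st.1, st.2 ++ [line])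
  else st

-- A's trailing while-pop loop
def pvPopTrailA (l : List String) : List String :=
  if h : l.isEmpty = false ∧ PySem.Str.strip (l.getLast?.getD "") == "" then
    pvPopTrailA l.dropLast
  else l
termination_by l.length
decreasing_by
  have hne : l ≠ [] := by simpa [List.isEmpty_iff] using h.1
  have hpos : 0 < l.length := List.length_pos_iff.mpr hne
  simp [List.length_dropLast]
  omega

def clean_config_output_py (output : String) : String :=
  let lines := (PySem.Str.split? output "\n").getD []   -- sep "\n" ≠ "", so split? is some
  let st := lines.foldl pvStepA (true, [])
  PySem.Str.join "\n" (pvPopTrailA st.2)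

-- ===== PORT B =====
-- Source B's helpers take the already-stripped line
def pvIsStartB (s : String) : Bool :=
  PySem.Str.startswith s "#config-version=" || PySem.Str.startswith s "config "

def pvIsNoiseB (s : String) : Bool :=
  PySem.Str.endswith s "#" || PySem.Str.endswith s "$" ||
    PySem.Str.startswith s "show" || s == "--More--" ||
    PySem.Str.isIn "Handling pagination..." s || PySem.Str.isIn "Downloaded:" s

-- one iteration of Source B's reverse loop; state = (acc, start, k)
def pvStepB (st : List String × Option String × Nat) (line : String) :
    List String × Option String × Nat :=
  let s := PySem.Str.strip line
  let st1 := if pvIsStartB s then (st.1, some line, st.1.length) else st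
  if pvIsNoiseB s then st1
  else if s == "" && st1.1.isEmpty then st1
  else (st1.1 ++ [line], st1.2)

def clean_config_output_py_alt (output : String) : String :=
  let lines := (PySem.Str.split? output "\n").getD []   -- sep "\n" ≠ "", so split? is some
  let st := lines.reverse.foldl pvStepB ([], none, 0)
  match st.2.1 with
  | none => ""
  | some s0 => PySem.Str.join "\n" (s0 :: (st.1.take st.2.2).reverse)

-- ===== PRECONDITION & SPEC =====
def Spec_clean_config_output_py (output : String) (out : String) : Prop := out = clean_config_output_py_alt output
instance (output : String) (out : String) : Decidable (Spec_clean_config_output_py output out) := by unfold Spec_clean_config_output_py; infer_instance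

-- ===== CLAIM (what is proved, stated in full; the proofs are below) =====
def Claim_equal_clean_config_output_py : Prop := ∀ (output : String), Dom_clean_config_output_py output → Spec_clean_config_output_py output (clean_config_output_py output)

-- ===== LEMMAS AND PROOFS =====

-- proof-side vocabulary
def pvBlank (s : String) : Bool := PySem.Str.strip s == ""
def pvF (ls : List String) : List String := ls.filter (fun x => !pvIsNoiseB (PySem.Str.strip x))
-- Source B's acc after the whole reverse scan of ls, in closed form
def pvAcc (ls : List String) : List String := ((pvF ls).reverse).dropWhile pvBlank
-- the suffix of ls from its first config-start line
def pvDropToStart : List String → List String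
  | [] => []
  | l :: rest => if pvIsStartB (PySem.Str.strip l) then l :: rest else pvDropToStart rest
-- Source B's (start, k) after the whole reverse scan, in closed form
def pvStartK (ls : List String) : Option String × Nat :=
  match pvDropToStart ls with
  | [] => (none, 0)
  | l :: rest => (some l, (pvAcc rest).length)

lemma stepA_false (acc : List String) (line : String) :
    pvStepA (false, acc) line =
      if pvIsNoiseB (PySem.Str.strip line) then (false, acc)
      else if PySem.Str.strip line != "" || acc != [] then (false, acc ++ [line])
      else (false, acc) := by
  simp only [pvStepA, Bool.false_eq_true, if_false]
  rfl

lemma stepA_true (acc : List String) (line : String) :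
    pvStepA (true, acc) line =
      if pvIsStartB (PySem.Str.strip line) then (false, acc ++ [line]) else (true, acc) := by
  simp only [pvStepA, if_true]
  rfl

-- after the start line is found, A's loop just filters out the noise lines
lemma foldl_stepA_false (ls : List String) (acc : List String) (hacc : acc ≠ []) :
    ls.foldl pvStepA (false, acc) = (false, acc ++ pvF ls) := by
  induction ls generalizing acc with
  | nil => simp [pvF]
  | cons l rest ih =>
    rw [List.foldl_cons, stepA_false]
    cases hn : pvIsNoiseB (PySem.Str.strip l) with
    | true => simp [pvF, hn, ih acc hacc]
    | false =>
      have hb : (acc != []) = true := by simpa using hacc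
      simp [pvF, hn, hb, ih (acc ++ [l]) (by simp)]

-- the skip phase: A's loop state after the whole list, via pvDropToStart
lemma foldl_stepA_true (ls : List String) :
    ls.foldl pvStepA (true, []) =
      match pvDropToStart ls with
      | [] => ((true : Bool), ([] : List String))
      | l :: rest => (false, l :: pvF rest) := by
  induction ls with
  | nil => simp [pvDropToStart]
  | cons l rest ih =>
    rw [List.foldl_cons, stepA_true]
    cases hs : pvIsStartB (PySem.Str.strip l) with
    | true => simp [pvDropToStart, hs, foldl_stepA_false rest [l] (by simp)]
    | false => simp [pvDropToStart, hs, ih]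

-- A's while-pop of trailing blank lines = reverse / dropWhile / reverse
lemma popTrailA_eq (l : List String) :
    pvPopTrailA l = (l.reverse.dropWhile pvBlank).reverse := by
  induction l using List.reverseRecOn with
  | nil => rw [pvPopTrailA]; simp
  | append_singleton init last ih =>
    rw [pvPopTrailA]
    by_cases h : (PySem.Str.strip last == "") = true
    · simpa [pvBlank, h] using ih
    · simp [pvBlank, h]

lemma dropWhile_append_singleton {α : Type} (p : α → Bool) (x : List α) (a : α)
    (h : p a = false) : List.dropWhile p (x ++ [a]) = List.dropWhile p x ++ [a] := by
  rw [List.dropWhile_append]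
  split_ifs with h1
  · simp only [List.isEmpty_iff] at h1
    simp [h1, List.dropWhile_cons, h]
  · rfl

-- how pvAcc grows by one line at the front of the scanned list
lemma acc_cons (l : String) (rest : List String) :
    pvAcc (l :: rest) =
      if pvIsNoiseB (PySem.Str.strip l) then pvAcc rest
      else if pvBlank l && (pvAcc rest).isEmpty then []
      else pvAcc rest ++ [l] := by
  cases hn : pvIsNoiseB (PySem.Str.strip l) with
  | true => simp [pvAcc, pvF, hn]
  | false =>
    have hf : pvF (l :: rest) = l :: pvF rest := by simp [pvF, hn]
    simp only [pvAcc, hf, List.reverse_cons, hn, if_false]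
    by_cases hb : pvBlank l = true
    · by_cases he : ((pvF rest).reverse.dropWhile pvBlank).isEmpty = true
      · rw [List.dropWhile_append]
        simp [he, List.dropWhile_cons, hb]
      · rw [List.dropWhile_append]
        simp [he, hb]
    · have hb' : pvBlank l = false := by simpa using hb
      rw [dropWhile_append_singleton pvBlank _ l hb']
      simp [hb']

lemma acc_prefix_cons (l : String) (rest : List String) :
    pvAcc rest <+: pvAcc (l :: rest) := by
  rw [acc_cons]
  split_ifs with h1 h2
  · exact List.prefix_refl _
  · have : pvAcc rest = [] := by
      simp only [Bool.and_eq_true, List.isEmpty_iff] at h2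
      exact h2.2
    simp [this]
  · exact List.prefix_append _ _

lemma acc_suffix_prefix : ∀ (ls rest : List String), rest <:+ ls → pvAcc rest <+: pvAcc ls := by
  intro ls
  induction ls with
  | nil => intro rest h; rw [List.suffix_nil.mp h]
  | cons l ls' ih =>
    intro rest h
    rcases List.suffix_cons_iff.mp h with h | h
    · rw [h]
    · exact (ih rest h).trans (acc_prefix_cons l ls')

lemma dropToStart_suffix : ∀ (ls : List String), pvDropToStart ls <:+ ls := by
  intro ls
  induction ls with
  | nil => simp [pvDropToStart]
  | cons l rest ih =>
    rw [pvDropToStart]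
    split_ifs
    · exact List.suffix_refl _
    · exact ih.trans (List.suffix_cons l rest)

-- the whole reverse scan of Source B, in closed form
lemma foldr_stepB (ls : List String) :
    ls.foldr (fun x st => pvStepB st x) ([], none, 0) = (pvAcc ls, pvStartK ls) := by
  induction ls with
  | nil => simp [pvAcc, pvF, pvStartK, pvDropToStart]
  | cons l rest ih =>
    rw [List.foldr_cons, ih]
    have hst1 : (if pvIsStartB (PySem.Str.strip l) then
          ((pvAcc rest, pvStartK rest).1, some l, (pvAcc rest, pvStartK rest).1.length)
        else (pvAcc rest, pvStartK rest)) = (pvAcc rest, pvStartK (l :: rest)) := by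
      cases hs : pvIsStartB (PySem.Str.strip l) with
      | true => simp [pvStartK, pvDropToStart, hs]
      | false => simp [pvStartK, pvDropToStart, hs]
    show (let s := PySem.Str.strip l
      let st1 := if pvIsStartB s then
          ((pvAcc rest, pvStartK rest).1, some l, (pvAcc rest, pvStartK rest).1.length)
        else (pvAcc rest, pvStartK rest)
      if pvIsNoiseB s then st1
      else if s == "" && st1.1.isEmpty then st1
      else (st1.1 ++ [l], st1.2)) = (pvAcc (l :: rest), pvStartK (l :: rest))
    simp only [hst1]
    rw [acc_cons]
    cases hn : pvIsNoiseB (PySem.Str.strip l) with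
    | true => simp [hn]
    | false =>
      simp only [hn, Bool.false_eq_true, if_false]
      by_cases hb : (PySem.Str.strip l == "") = true
      · by_cases he : (pvAcc rest).isEmpty = true
        · have : pvAcc rest = [] := List.isEmpty_iff.mp he
          simp [pvBlank, hb, he, this]
        · simp [pvBlank, hb, he]
      · simp [pvBlank, hb]

lemma isStart_not_blank (l : String) (h : pvIsStartB (PySem.Str.strip l) = true) :
    pvBlank l = false := by
  unfold pvBlank
  cases he : (PySem.Str.strip l == "") with
  | false => rfl
  | true =>
    have h0 : PySem.Str.strip l = "" := by simpa using he
    rw [h0] at h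
    exact absurd h (by decide)

lemma dropToStart_head : ∀ (ls : List String) (l : String) (rest : List String),
    pvDropToStart ls = l :: rest → pvIsStartB (PySem.Str.strip l) = true := by
  intro ls
  induction ls with
  | nil => intro l rest h; simp [pvDropToStart] at h
  | cons x xs ih =>
    intro l rest h
    rw [pvDropToStart] at h
    split_ifs at h with hx
    · cases h; exact hx
    · exact ih l rest h

-- ===== VERDICT (by name: the statement is the Claim_ definition above) =====
theorem clean_config_output_py_spec : Claim_equal_clean_config_output_py := by
  intro output _
  unfold Spec_clean_config_output_py clean_config_output_py clean_config_output_py_alt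
  simp only [foldl_stepA_true, List.foldl_reverse, foldr_stepB, pvStartK]
  cases hd : pvDropToStart ((PySem.Str.split? output "\n").getD []) with
  | nil => simp [popTrailA_eq, PySem.Str.join]
  | cons l rest =>
    simp only [popTrailA_eq]
    have hsuf : rest <:+ (PySem.Str.split? output "\n").getD [] := by
      have h1 := dropToStart_suffix ((PySem.Str.split? output "\n").getD [])
      rw [hd] at h1
      exact (List.suffix_cons l rest).trans h1
    have htake : (pvAcc ((PySem.Str.split? output "\n").getD [])).take (pvAcc rest).length
        = pvAcc rest := by
      have hp := acc_suffix_prefix _ rest hsuf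
      exact (List.prefix_iff_eq_take.mp hp).symm
    have hstart : pvIsStartB (PySem.Str.strip l) = true :=
      dropToStart_head _ l rest hd
    have hnb : pvBlank l = false := isStart_not_blank l hstart
    simp only [List.reverse_cons]
    rw [dropWhile_append_singleton pvBlank _ l hnb, htake]
    simp [pvAcc]
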